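-- pv_equiv track=rewrite | github.com/uflowie/aoc2023 | 22/solution.py | cubes
-- ===== SOURCE A (Python) =====
-- def cubes(brick):
--     (x1, y1, z1), (x2, y2, z2) = brick
--     if y2 > y1:
--         return [(x1, y, z1) for y in range(y1, y2 + 1)]
--     if z2 > z1:
--         return [(x1, y1, z) for z in range(z1, z2 + 1)]
--     else:
--         return [(x, y1, z1) for x in range(x1, x2 + 1)]
-- ===== SOURCE B (Python) =====
-- def cubes(brick):
--     (x1, y1, z1), (x2, y2, z2) = brick
--     if y2 > y1:
--         end = (x1, y2, z1)
--     elif z2 > z1: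
--         end = (x1, y1, z2)
--     elif x2 >= x1:
--         end = (x2, y1, z1)
--     else:
--         return []
--     out = []
--     cur = (x1, y1, z1)
--     while cur != end:
--         out.append(cur)
--         cur = tuple(c + (e > c) - (e < c) for c, e in zip(cur, end))
--     out.append(cur)
--     return out
-- ===== Notes on version B (the rewrite author's own statement) =====
-- stated objective: alternative
-- what changed: B first picks the end cube of the brick (empty-range x case returns [] directly), then enumerates by a sign-step segment walk: a while loop that appends the current cube and moves it one unit toward the end cube, instead of A's three branch-bound range comprehensions.
import Mathlib
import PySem

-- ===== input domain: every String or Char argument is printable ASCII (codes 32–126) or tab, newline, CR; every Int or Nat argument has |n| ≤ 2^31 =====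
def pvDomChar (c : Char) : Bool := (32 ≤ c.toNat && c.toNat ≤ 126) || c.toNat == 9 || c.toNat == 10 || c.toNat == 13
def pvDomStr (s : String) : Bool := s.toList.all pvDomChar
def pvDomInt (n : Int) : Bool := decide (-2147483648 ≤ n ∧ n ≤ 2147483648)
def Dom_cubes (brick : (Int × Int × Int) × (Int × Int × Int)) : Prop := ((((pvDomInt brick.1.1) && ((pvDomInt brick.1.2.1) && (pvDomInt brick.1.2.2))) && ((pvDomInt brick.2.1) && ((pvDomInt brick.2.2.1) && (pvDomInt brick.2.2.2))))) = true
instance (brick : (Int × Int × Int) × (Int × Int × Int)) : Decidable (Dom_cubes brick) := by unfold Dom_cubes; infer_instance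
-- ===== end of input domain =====

-- B enumerates the brick by a recursive segment walk (sign-step from the start cube
-- toward the computed end cube), instead of A's three branch-bound range comprehensions
-- (objective: alternative).


-- ===== PORT A =====
def cubes (brick : (Int × Int × Int) × (Int × Int × Int)) : List (Int × Int × Int) :=
  let ((x1, y1, z1), (x2, y2, z2)) := brick
  if y2 > y1 then
    (PySem.List.pyRange y1 (y2 + 1) 1).map (fun y => (x1, y, z1))
  else if z2 > z1 then
    (PySem.List.pyRange z1 (z2 + 1) 1).map (fun z => (x1, y1, z))
  else
    (PySem.List.pyRange x1 (x2 + 1) 1).map (fun x => (x, y1, z1))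

-- ===== PORT B =====
-- c + (e > c) - (e < c): Python bools count as 0/1 in arithmetic
def pvStep (c e : Int) : Int :=
  c + (if e > c then 1 else 0) - (if e < c then 1 else 0)

-- the while loop, transcribed with fuel = remaining distance to fin (exact for the calls below):
-- append cur, step one unit toward fin; afterwards append the final cur
def pvWalk : Nat → List (Int × Int × Int) → (Int × Int × Int) → (Int × Int × Int) → List (Int × Int × Int)
  | 0, out, cur, _ => out ++ [cur]
  | n + 1, out, cur, fin =>
    if cur = fin then out ++ [cur]
    else pvWalk n (out ++ [cur]) (pvStep cur.1 fin.1, pvStep cur.2.1 fin.2.1, pvStep cur.2.2 fin.2.2) fin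

def pvFuel (cur fin : Int × Int × Int) : Nat :=
  (fin.1 - cur.1).natAbs + (fin.2.1 - cur.2.1).natAbs + (fin.2.2 - cur.2.2).natAbs

def cubes_alt (brick : (Int × Int × Int) × (Int × Int × Int)) : List (Int × Int × Int) :=
  let ((x1, y1, z1), (x2, y2, z2)) := brick
  if y2 > y1 then pvWalk (pvFuel (x1, y1, z1) (x1, y2, z1)) [] (x1, y1, z1) (x1, y2, z1)
  else if z2 > z1 then pvWalk (pvFuel (x1, y1, z1) (x1, y1, z2)) [] (x1, y1, z1) (x1, y1, z2)
  else if x2 ≥ x1 then pvWalk (pvFuel (x1, y1, z1) (x2, y1, z1)) [] (x1, y1, z1) (x2, y1, z1)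
  else []

-- ===== PRECONDITION & SPEC =====
def Spec_cubes (brick : (Int × Int × Int) × (Int × Int × Int)) (out : List (Int × Int × Int)) : Prop := out = cubes_alt brick
instance (brick : (Int × Int × Int) × (Int × Int × Int)) (out : List (Int × Int × Int)) : Decidable (Spec_cubes brick out) := by unfold Spec_cubes; infer_instance

-- ===== CLAIM (what is proved, stated in full; the proofs are below) =====
def Claim_equal_cubes : Prop := ∀ (brick : (Int × Int × Int) × (Int × Int × Int)), Dom_cubes brick → Spec_cubes brick (cubes brick)

-- ===== LEMMAS AND PROOFS =====
lemma pvRange_nil {a b : Int} (h : b ≤ a) : PySem.List.pyRange a b 1 = [] :=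
  List.eq_nil_of_length_eq_zero (by rw [PySem.List.length_pyRange_one]; omega)

lemma pvStep_self (c : Int) : pvStep c c = c := by simp [pvStep]

lemma pvStep_up {c e : Int} (h : c < e) : pvStep c e = c + 1 := by
  simp [pvStep, h, not_lt.mpr (le_of_lt h)]

lemma pvWalk_acc : ∀ (n : Nat) (out : List (Int × Int × Int)) (cur fin : Int × Int × Int),
    pvWalk n out cur fin = out ++ pvWalk n [] cur fin := by
  intro n
  induction n with
  | zero => intro out cur fin; rw [pvWalk, pvWalk]; simp
  | succ k ih =>
    intro out cur fin
    by_cases hc : cur = fin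
    · rw [pvWalk, if_pos hc, pvWalk, if_pos hc]; simp
    · rw [pvWalk, if_neg hc]
      conv_rhs => rw [pvWalk, if_neg hc]
      rw [ih (out ++ [cur]), ih ([] ++ [cur])]
      simp

lemma pvWalk_axisY (x z : Int) : ∀ (n : Nat) (y b : Int), b - y = n →
    pvWalk n [] (x, y, z) (x, b, z) = (PySem.List.pyRange y (b + 1) 1).map (fun v => (x, v, z)) := by
  intro n
  induction n with
  | zero =>
    intro y b h
    have hb : b = y := by omega
    subst hb
    rw [pvWalk, PySem.List.pyRange_one_cons (show b < b + 1 by omega),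
      pvRange_nil (le_refl (b + 1))]
    simp
  | succ k ih =>
    intro y b h
    have hy : y < b := by omega
    rw [pvWalk]
    simp only [pvStep_self, pvStep_up hy]
    rw [if_neg (by simp; omega), pvWalk_acc k,
      ih (y + 1) b (by omega),
      PySem.List.pyRange_one_cons (by omega : y < b + 1)]
    simp

lemma pvWalk_axisZ (x y : Int) : ∀ (n : Nat) (z b : Int), b - z = n →
    pvWalk n [] (x, y, z) (x, y, b) = (PySem.List.pyRange z (b + 1) 1).map (fun v => (x, y, v)) := by
  intro n
  induction n with
  | zero =>
    intro z b h
    have hb : b = z := by omega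
    subst hb
    rw [pvWalk, PySem.List.pyRange_one_cons (show b < b + 1 by omega),
      pvRange_nil (le_refl (b + 1))]
    simp
  | succ k ih =>
    intro z b h
    have hz : z < b := by omega
    rw [pvWalk]
    simp only [pvStep_self, pvStep_up hz]
    rw [if_neg (by simp; omega), pvWalk_acc k,
      ih (z + 1) b (by omega),
      PySem.List.pyRange_one_cons (by omega : z < b + 1)]
    simp

lemma pvWalk_axisX (y z : Int) : ∀ (n : Nat) (x b : Int), b - x = n →
    pvWalk n [] (x, y, z) (b, y, z) = (PySem.List.pyRange x (b + 1) 1).map (fun v => (v, y, z)) := by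
  intro n
  induction n with
  | zero =>
    intro x b h
    have hb : b = x := by omega
    subst hb
    rw [pvWalk, PySem.List.pyRange_one_cons (show b < b + 1 by omega),
      pvRange_nil (le_refl (b + 1))]
    simp
  | succ k ih =>
    intro x b h
    have hx : x < b := by omega
    rw [pvWalk]
    simp only [pvStep_self, pvStep_up hx]
    rw [if_neg (by simp; omega), pvWalk_acc k,
      ih (x + 1) b (by omega),
      PySem.List.pyRange_one_cons (by omega : x < b + 1)]
    simp

-- ===== VERDICT (by name: the statement is the Claim_ definition above) =====
theorem cubes_spec : Claim_equal_cubes := by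
  rintro ⟨⟨x1, y1, z1⟩, ⟨x2, y2, z2⟩⟩ _
  unfold Spec_cubes cubes cubes_alt
  simp only
  split_ifs with h1 h2 h3
  · have : pvFuel (x1, y1, z1) (x1, y2, z1) = (y2 - y1).toNat := by simp [pvFuel]; omega
    rw [this, pvWalk_axisY x1 z1 (y2 - y1).toNat y1 y2 (by omega)]
  · have : pvFuel (x1, y1, z1) (x1, y1, z2) = (z2 - z1).toNat := by simp [pvFuel]; omega
    rw [this, pvWalk_axisZ x1 y1 (z2 - z1).toNat z1 z2 (by omega)]
  · have : pvFuel (x1, y1, z1) (x2, y1, z1) = (x2 - x1).toNat := by simp [pvFuel]; omega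
    rw [this, pvWalk_axisX y1 z1 (x2 - x1).toNat x1 x2 (by omega)]
  · rw [pvRange_nil (by omega)]; simp
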